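-- pv_equiv track=rewrite | github.com/KMORaza/leetcode-solutions | LeetCode Solutions/0675.py | cutOffTree
-- ===== SOURCE A (Python) =====
-- from collections import deque
-- from typing import List, Tuple
--
-- def cutOffTree(forest: List[List[int]]) -> int:
--     m, n = len(forest), len(forest[0])
--     def bfs(start: Tuple[int, int], end: Tuple[int, int]) -> int:
--         if start == end:
--             return 0
--         directions = [(0, 1), (1, 0), (0, -1), (-1, 0)]
--         queue = deque([start])
--         visited = set([start])
--         steps = 0
--         while queue:
--             for _ in range(len(queue)):
--                 x, y = queue.popleft()
--                 for dx, dy in directions: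
--                     nx, ny = x + dx, y + dy
--                     if (0 <= nx < m and 0 <= ny < n and
--                         (nx, ny) not in visited and forest[nx][ny] != 0):
--                         if (nx, ny) == end:
--                             return steps + 1
--                         queue.append((nx, ny))
--                         visited.add((nx, ny))
--             steps += 1
--         return -1
--     trees = []
--     for i in range(m):
--         for j in range(n):
--             if forest[i][j] > 1:
--                 trees.append((forest[i][j], i, j))
--     trees.sort()
--     start = (0, 0)
--     total_steps = 0
--     for height, x, y in trees:
--         steps = bfs(start, (x, y))
--         if steps == -1:
--             return -1
--         total_steps += steps
--         start = (x, y)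
--     return total_steps
-- ===== SOURCE B (Python) =====
-- from typing import List
--
-- def cutOffTree(forest: List[List[int]]) -> int:
--     m, n = len(forest), len(forest[0])
--
--     def dist(src, dst):
--         # layered flood fill: no queue; each layer is recomputed by scanning
--         # the whole grid for open cells Manhattan-adjacent to the frontier
--         if src == dst:
--             return 0
--         visited = {src}
--         frontier = {src}
--         steps = 0
--         while frontier:
--             steps += 1
--             nxt = {(i, j)
--                    for i in range(m) for j in range(n)
--                    if (i, j) not in visited and forest[i][j] != 0
--                    and ((i + 1, j) in frontier or (i - 1, j) in frontier
--                         or (i, j + 1) in frontier or (i, j - 1) in frontier)}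
--             if dst in nxt:
--                 return steps
--             visited |= nxt
--             frontier = nxt
--         return -1
--
--     trees = sorted((forest[i][j], i, j) for i in range(m) for j in range(n)
--                    if forest[i][j] > 1)
--     start = (0, 0)
--     total = 0
--     for _, x, y in trees:
--         d = dist(start, (x, y))
--         if d == -1:
--             return -1
--         total += d
--         start = (x, y)
--     return total
-- ===== Notes on version B (the rewrite author's own statement) =====
-- stated objective: alternative
-- what changed: The per-pair deque BFS (pop each node, push its four unvisited open neighbours, count levels) is replaced by a layered flood fill with no queue at all: each distance layer is recomputed as a set comprehension scanning the whole grid for open unvisited cells with a neighbour in the current frontier set.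
import Mathlib
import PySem

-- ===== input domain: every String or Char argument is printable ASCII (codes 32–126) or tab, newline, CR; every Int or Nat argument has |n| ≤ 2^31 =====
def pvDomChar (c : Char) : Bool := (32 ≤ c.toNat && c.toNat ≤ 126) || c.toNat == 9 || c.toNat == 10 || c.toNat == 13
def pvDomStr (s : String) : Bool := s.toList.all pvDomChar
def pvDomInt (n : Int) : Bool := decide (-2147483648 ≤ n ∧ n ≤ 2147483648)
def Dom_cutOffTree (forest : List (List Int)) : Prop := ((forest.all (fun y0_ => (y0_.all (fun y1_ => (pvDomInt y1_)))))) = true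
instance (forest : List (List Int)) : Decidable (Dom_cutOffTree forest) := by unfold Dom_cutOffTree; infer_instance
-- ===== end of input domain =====

-- B replaces A's deque-based per-node BFS between consecutive trees by a layered
-- flood fill that recomputes each distance layer with a whole-grid scan for open
-- cells Manhattan-adjacent to the current frontier (objective: alternative).

-- ===== PORT A =====
-- forest[x][y] (only evaluated after the 0 ≤ x < m, 0 ≤ y < n bounds checks, so getD is exact)
def pvVal (forest : List (List Int)) (x y : Int) : Int :=
  (forest.getD x.toNat []).getD y.toNat 0

def pvDirs : List (Int × Int) := [(0,1),(1,0),(0,-1),(-1,0)]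

-- the inner `for dx, dy in directions` loop of A's bfs; `none` = `return steps + 1` fired
def pvInner (forest : List (List Int)) (m n : Int) (endc : Int × Int) (x y : Int) :
    List (Int × Int) → List (Int × Int) → PySem.Set (Int × Int) →
    Option (List (Int × Int) × PySem.Set (Int × Int))
  | [], acc, vis => some (acc, vis)
  | (dx,dy) :: ds, acc, vis =>
      let nx := x + dx
      let ny := y + dy
      if 0 ≤ nx ∧ nx < m ∧ 0 ≤ ny ∧ ny < n ∧ (nx,ny) ∉ vis ∧ pvVal forest nx ny ≠ 0 then
        if (nx,ny) = endc then none
        else pvInner forest m n endc x y ds (acc ++ [(nx,ny)]) (PySem.Set.add vis (nx,ny))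
      else pvInner forest m n endc x y ds acc vis

-- the `for _ in range(len(queue))` level loop of A's bfs
def pvLevelA (forest : List (List Int)) (m n : Int) (endc : Int × Int) :
    List (Int × Int) → List (Int × Int) → PySem.Set (Int × Int) →
    Option (List (Int × Int) × PySem.Set (Int × Int))
  | [], acc, vis => some (acc, vis)
  | (x,y) :: rest, acc, vis =>
      match pvInner forest m n endc x y pvDirs acc vis with
      | none => none
      | some (acc', vis') => pvLevelA forest m n endc rest acc' vis'

-- the `while queue` loop; fuel (m*n+2 levels always suffices: each level's queue holds
-- fresh distinct in-range cells) only makes the recursion structural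
def pvBfsA (forest : List (List Int)) (m n : Int) (endc : Int × Int) :
    Nat → List (Int × Int) → PySem.Set (Int × Int) → Int → Int
  | 0, _, _, _ => -1
  | fuel+1, queue, vis, steps =>
      if queue.isEmpty then -1
      else
        match pvLevelA forest m n endc queue [] vis with
        | none => steps + 1
        | some (q', vis') => pvBfsA forest m n endc fuel q' vis' (steps + 1)

def pvBfs (forest : List (List Int)) (m n : Int) (start endc : Int × Int) : Int :=
  if start = endc then 0
  else pvBfsA forest m n endc ((m * n).toNat + 2) [start] (PySem.Set.ofList [start]) 0

-- tree collection: the i/j append loops; trees.sort() sorts tuples (h,i,j) lexicographically;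
-- since the list is built in row-major (i,j) order, a STABLE sort by height alone is exact
def pvTreesA (forest : List (List Int)) (m n : Int) : List (Int × Int × Int) :=
  (PySem.List.pyRange 0 m 1).foldl
    (fun acc i =>
      (PySem.List.pyRange 0 n 1).foldl
        (fun acc j => if pvVal forest i j > 1 then acc ++ [(pvVal forest i j, i, j)] else acc)
        acc)
    []

def pvRunA (forest : List (List Int)) (m n : Int) :
    List (Int × Int × Int) → Int × Int → Int → Int
  | [], _, total => total
  | (_, x, y) :: rest, start, total =>
      let steps := pvBfs forest m n start (x, y)
      if steps = -1 then -1 else pvRunA forest m n rest (x, y) (total + steps)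

def cutOffTree (forest : List (List Int)) : Int :=
  let m : Int := forest.length
  let n : Int := (forest.headD []).length
  pvRunA forest m n
    (PySem.List.sorted (pvTreesA forest m n) (fun t => t.1) false) (0, 0) 0

-- ===== PORT B =====
def pvCells (m n : Int) : List (Int × Int) :=
  (PySem.List.pyRange 0 m 1).flatMap (fun i => (PySem.List.pyRange 0 n 1).map (fun j => (i, j)))

-- the set comprehension computing the next layer (distinct by construction)
def pvNext (forest : List (List Int)) (m n : Int)
    (vis : PySem.Set (Int × Int)) (frontier : List (Int × Int)) : List (Int × Int) :=
  (pvCells m n).filter (fun c =>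
    decide (c ∉ vis) && decide (pvVal forest c.1 c.2 ≠ 0) &&
    decide ((c.1 + 1, c.2) ∈ frontier ∨ (c.1 - 1, c.2) ∈ frontier ∨
            (c.1, c.2 + 1) ∈ frontier ∨ (c.1, c.2 - 1) ∈ frontier))

-- the `while frontier` loop of B's dist
def pvBfsB (forest : List (List Int)) (m n : Int) (dst : Int × Int) :
    Nat → List (Int × Int) → PySem.Set (Int × Int) → Int → Int
  | 0, _, _, _ => -1
  | fuel+1, frontier, vis, steps =>
      if frontier.isEmpty then -1
      else
        let nxt := pvNext forest m n vis frontier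
        if dst ∈ nxt then steps + 1
        else pvBfsB forest m n dst fuel nxt (PySem.Set.union vis nxt) (steps + 1)

def pvDist (forest : List (List Int)) (m n : Int) (src dst : Int × Int) : Int :=
  if src = dst then 0
  else pvBfsB forest m n dst ((m * n).toNat + 2) [src] (PySem.Set.ofList [src]) 0

-- sorted((forest[i][j], i, j) for …): generated row-major, stable sort by height is exact
def pvTreesB (forest : List (List Int)) (m n : Int) : List (Int × Int × Int) :=
  PySem.List.sorted
    ((PySem.List.pyRange 0 m 1).flatMap (fun i =>
      ((PySem.List.pyRange 0 n 1).filter (fun j => decide (pvVal forest i j > 1))).map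
        (fun j => (pvVal forest i j, i, j))))
    (fun t => t.1) false

def pvRunB (forest : List (List Int)) (m n : Int) :
    List (Int × Int × Int) → Int × Int → Int → Int
  | [], _, total => total
  | (_, x, y) :: rest, start, total =>
      let d := pvDist forest m n start (x, y)
      if d = -1 then -1 else pvRunB forest m n rest (x, y) (total + d)

def cutOffTree_alt (forest : List (List Int)) : Int :=
  let m : Int := forest.length
  let n : Int := (forest.headD []).length
  pvRunB forest m n (pvTreesB forest m n) (0, 0) 0

-- ===== PRECONDITION & SPEC =====
-- Pre_ = exactly where Python A returns: it raises IndexError on an empty forest and on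
-- any row shorter than the first row (columns past the first row's length are never read).
def Pre_cutOffTree (forest : List (List Int)) : Prop :=
  forest ≠ [] ∧ ∀ row ∈ forest, (forest.headD []).length ≤ row.length
instance (forest : List (List Int)) : Decidable (Pre_cutOffTree forest) := by
  unfold Pre_cutOffTree; infer_instance

def pvWitness_cutOffTree : List (List Int) := [[2, 0], [1, 3]]

def Spec_cutOffTree (forest : List (List Int)) (out : Int) : Prop := out = cutOffTree_alt forest
instance (forest : List (List Int)) (out : Int) : Decidable (Spec_cutOffTree forest out) := by
  unfold Spec_cutOffTree; infer_instance

-- ===== CLAIM (what is proved, stated in full; the proofs are below) =====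
def Claim_equal_cutOffTree : Prop :=
  ∀ (forest : List (List Int)), Dom_cutOffTree forest → Pre_cutOffTree forest →
    Spec_cutOffTree forest (cutOffTree forest)

-- ===== LEMMAS AND PROOFS =====

def pvGood (forest : List (List Int)) (m n : Int) (vis0 : PySem.Set (Int × Int))
    (c : Int × Int) : Prop :=
  0 ≤ c.1 ∧ c.1 < m ∧ 0 ≤ c.2 ∧ c.2 < n ∧ c ∉ vis0 ∧ pvVal forest c.1 c.2 ≠ 0

lemma pvInner_spec (forest : List (List Int)) (m n : Int) (endc : Int × Int) (x y : Int)
    (ds : List (Int × Int)) : ∀ (acc : List (Int × Int)) (vis vis0 : PySem.Set (Int × Int)),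
    (∀ c, c ∈ vis ↔ c ∈ vis0 ∨ c ∈ acc) →
    (endc ∉ vis0 ∧ endc ∉ acc) →
    (pvInner forest m n endc x y ds acc vis = none ↔
      pvGood forest m n vis0 endc ∧ ∃ d ∈ ds, endc = (x + d.1, y + d.2)) ∧
    (∀ q' vis', pvInner forest m n endc x y ds acc vis = some (q', vis') →
      endc ∉ q' ∧
      (∀ c, c ∈ q' ↔ c ∈ acc ∨ (pvGood forest m n vis0 c ∧ ∃ d ∈ ds, c = (x + d.1, y + d.2))) ∧
      (∀ c, c ∈ vis' ↔ c ∈ vis0 ∨ c ∈ q')) := by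
  induction ds with
  | nil =>
    intro acc vis vis0 hvis hend
    constructor
    · simp [pvInner]
    · intro q' vis' h
      simp [pvInner] at h
      obtain ⟨rfl, rfl⟩ := h
      exact ⟨hend.2, by simp, hvis⟩
  | cons hd ds ih =>
    obtain ⟨dx, dy⟩ := hd
    intro acc vis vis0 hvis hend
    simp only [pvInner]
    by_cases hc : 0 ≤ x + dx ∧ x + dx < m ∧ 0 ≤ y + dy ∧ y + dy < n ∧
        (x + dx, y + dy) ∉ vis ∧ pvVal forest (x + dx) (y + dy) ≠ 0
    · have hnv0 : (x + dx, y + dy) ∉ vis0 := fun h => hc.2.2.2.2.1 ((hvis _).2 (Or.inl h))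
      have hgood : pvGood forest m n vis0 (x + dx, y + dy) :=
        ⟨hc.1, hc.2.1, hc.2.2.1, hc.2.2.2.1, hnv0, hc.2.2.2.2.2⟩
      rw [if_pos hc]
      by_cases he : (x + dx, y + dy) = endc
      · rw [if_pos he]
        refine ⟨⟨fun _ => ⟨he ▸ hgood, ⟨(dx, dy), by simp, he.symm⟩⟩, fun _ => rfl⟩,
          fun q' vis' h => by simp at h⟩
      · rw [if_neg he]
        have hvis' : ∀ c, c ∈ PySem.Set.add vis (x + dx, y + dy) ↔
            c ∈ vis0 ∨ c ∈ acc ++ [(x + dx, y + dy)] := by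
          intro c
          rw [PySem.Set.mem_add, hvis c]
          simp; tauto
        have hend' : endc ∉ vis0 ∧ endc ∉ acc ++ [(x + dx, y + dy)] := by
          refine ⟨hend.1, ?_⟩
          simp only [List.mem_append, List.mem_singleton]
          rintro (h | h)
          · exact hend.2 h
          · exact he (h ▸ rfl)
        obtain ⟨ihn, ihs⟩ := ih (acc ++ [(x + dx, y + dy)]) _ vis0 hvis' hend'
        constructor
        · rw [ihn]
          constructor
          · rintro ⟨hg, d, hd, hde⟩; exact ⟨hg, d, by simp [hd], hde⟩
          · rintro ⟨hg, d, hd, hde⟩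
            rcases List.mem_cons.1 hd with rfl | hd
            · exact absurd hde.symm he
            · exact ⟨hg, d, hd, hde⟩
        · intro q' vis' h
          obtain ⟨h1, h2, h3⟩ := ihs q' vis' h
          refine ⟨h1, fun c => ?_, h3⟩
          rw [h2 c]
          simp only [List.mem_append, List.mem_cons, List.not_mem_nil, or_false]
          constructor
          · rintro ((h | rfl) | ⟨hg, d, hd, hde⟩)
            · exact Or.inl h
            · exact Or.inr ⟨hgood, (dx, dy), Or.inl rfl, rfl⟩
            · exact Or.inr ⟨hg, d, Or.inr hd, hde⟩
          · rintro (h | ⟨hg, d, (rfl | hd), hde⟩)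
            · exact Or.inl (Or.inl h)
            · exact Or.inl (Or.inr hde)
            · exact Or.inr ⟨hg, d, hd, hde⟩
    · rw [if_neg hc]
      obtain ⟨ihn, ihs⟩ := ih acc vis vis0 hvis hend
      have hkey : ∀ c : Int × Int, pvGood forest m n vis0 c → c = (x + dx, y + dy) →
          c ∈ acc := by
        rintro c ⟨h1, h2, h3, h4, h5, h6⟩ rfl
        by_contra hacc
        exact hc ⟨h1, h2, h3, h4, fun hv => ((hvis _).1 hv).elim h5 hacc, h6⟩
      constructor
      · rw [ihn]
        constructor
        · rintro ⟨hg, d, hd, hde⟩; exact ⟨hg, d, by simp [hd], hde⟩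
        · rintro ⟨hg, d, hd, hde⟩
          rcases List.mem_cons.1 hd with rfl | hd
          · exact absurd (hkey endc hg hde) hend.2
          · exact ⟨hg, d, hd, hde⟩
      · intro q' vis' h
        obtain ⟨h1, h2, h3⟩ := ihs q' vis' h
        refine ⟨h1, fun c => ?_, h3⟩
        rw [h2 c]
        constructor
        · rintro (h | ⟨hg, d, hd, hde⟩)
          · exact Or.inl h
          · exact Or.inr ⟨hg, d, by simp [hd], hde⟩
        · rintro (h | ⟨hg, d, hd, hde⟩)
          · exact Or.inl h
          · rcases List.mem_cons.1 hd with rfl | hd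
            · exact Or.inl (hkey c hg hde)
            · exact Or.inr ⟨hg, d, hd, hde⟩

lemma pvAdj_iff (x y : Int) (c : Int × Int) :
    (∃ d ∈ pvDirs, c = (x + d.1, y + d.2)) ↔ (c.1 - x).natAbs + (c.2 - y).natAbs = 1 := by
  obtain ⟨cx, cy⟩ := c
  have key : (cx - x).natAbs + (cy - y).natAbs = 1 ↔
      (cx = x ∧ cy = y + 1) ∨ (cx = x + 1 ∧ cy = y) ∨
      (cx = x ∧ cy = y - 1) ∨ (cx = x - 1 ∧ cy = y) := by omega
  simp only [key, pvDirs, List.mem_cons, List.not_mem_nil, or_false, Prod.ext_iff]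
  constructor
  · rintro ⟨⟨dx, dy⟩, (h | h | h | h), h1, h2⟩ <;>
      (obtain ⟨rfl, rfl⟩ := Prod.mk.injEq .. ▸ h; simp_all)
  · rintro (⟨rfl, rfl⟩ | ⟨rfl, rfl⟩ | ⟨rfl, rfl⟩ | ⟨rfl, rfl⟩)
    · exact ⟨(0,1), by simp, by simp⟩
    · exact ⟨(1,0), by simp, by simp⟩
    · exact ⟨(0,-1), by simp, by constructor <;> simp [sub_eq_add_neg]⟩
    · exact ⟨(-1,0), by simp, by constructor <;> simp [sub_eq_add_neg]⟩

lemma pvLevelA_spec (forest : List (List Int)) (m n : Int) (endc : Int × Int)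
    (ws : List (Int × Int)) : ∀ (acc : List (Int × Int)) (vis vis0 : PySem.Set (Int × Int)),
    (∀ c, c ∈ vis ↔ c ∈ vis0 ∨ c ∈ acc) →
    (endc ∉ vis0 ∧ endc ∉ acc) →
    (pvLevelA forest m n endc ws acc vis = none ↔
      pvGood forest m n vis0 endc ∧
        ∃ p ∈ ws, (endc.1 - p.1).natAbs + (endc.2 - p.2).natAbs = 1) ∧
    (∀ q' vis', pvLevelA forest m n endc ws acc vis = some (q', vis') →
      endc ∉ q' ∧
      (∀ c, c ∈ q' ↔ c ∈ acc ∨ (pvGood forest m n vis0 c ∧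
        ∃ p ∈ ws, (c.1 - p.1).natAbs + (c.2 - p.2).natAbs = 1)) ∧
      (∀ c, c ∈ vis' ↔ c ∈ vis0 ∨ c ∈ q')) := by
  induction ws with
  | nil =>
    intro acc vis vis0 hvis hend
    constructor
    · simp [pvLevelA]
    · intro q' vis' h
      simp only [pvLevelA, Option.some.injEq, Prod.mk.injEq] at h
      obtain ⟨rfl, rfl⟩ := h
      exact ⟨hend.2, by simp, hvis⟩
  | cons hd rest ih =>
    obtain ⟨x, y⟩ := hd
    intro acc vis vis0 hvis hend
    obtain ⟨innN, innS⟩ := pvInner_spec forest m n endc x y pvDirs acc vis vis0 hvis hend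
    simp only [pvLevelA]
    rcases hinn : pvInner forest m n endc x y pvDirs acc vis with _ | ⟨acc', vis'⟩
    · have hx := innN.1 hinn
      refine ⟨⟨fun _ => ⟨hx.1, (x, y), List.mem_cons_self,
        (pvAdj_iff x y endc).1 hx.2⟩, fun _ => rfl⟩, fun q' vis' h => by simp at h⟩
    · obtain ⟨h1, h2, h3⟩ := innS acc' vis' hinn
      have hnotN : ¬(pvGood forest m n vis0 endc ∧
          (endc.1 - x).natAbs + (endc.2 - y).natAbs = 1) := by
        rintro ⟨hg, hadj⟩
        rw [hinn] at innN
        obtain ⟨d, hd, hde⟩ := (pvAdj_iff x y endc).2 hadj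
        simpa [hinn] using innN.2 ⟨hg, d, hd, hde⟩
      obtain ⟨ihN, ihS⟩ := ih acc' vis' vis0 h3 ⟨hend.1, h1⟩
      constructor
      · rw [ihN]
        constructor
        · rintro ⟨hg, p, hp, hadj⟩; exact ⟨hg, p, List.mem_cons_of_mem _ hp, hadj⟩
        · rintro ⟨hg, p, hp, hadj⟩
          rcases List.mem_cons.1 hp with rfl | hp
          · exact absurd ⟨hg, hadj⟩ hnotN
          · exact ⟨hg, p, hp, hadj⟩
      · intro q'' vis'' h
        obtain ⟨g1, g2, g3⟩ := ihS q'' vis'' h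
        refine ⟨g1, fun c => ?_, g3⟩
        rw [g2 c, h2 c]
        constructor
        · rintro ((h | ⟨hg, d, hd, hde⟩) | ⟨hg, p, hp, hadj⟩)
          · exact Or.inl h
          · exact Or.inr ⟨hg, (x, y), List.mem_cons_self, (pvAdj_iff x y c).1 ⟨d, hd, hde⟩⟩
          · exact Or.inr ⟨hg, p, List.mem_cons_of_mem _ hp, hadj⟩
        · rintro (h | ⟨hg, p, hp, hadj⟩)
          · exact Or.inl (Or.inl h)
          · rcases List.mem_cons.1 hp with rfl | hp
            · obtain ⟨d, hd, hde⟩ := (pvAdj_iff x y c).2 hadj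
              exact Or.inl (Or.inr ⟨hg, d, hd, hde⟩)
            · exact Or.inr ⟨hg, p, hp, hadj⟩

-- "one of c's four neighbours is in the frontier" = "some frontier cell is at Manhattan distance 1"
lemma pvNbr_iff (frontier : List (Int × Int)) (ci cj : Int) :
    ((ci + 1, cj) ∈ frontier ∨ (ci - 1, cj) ∈ frontier ∨
     (ci, cj + 1) ∈ frontier ∨ (ci, cj - 1) ∈ frontier) ↔
      ∃ p ∈ frontier, (ci - p.1).natAbs + (cj - p.2).natAbs = 1 := by
  constructor
  · rintro (h | h | h | h)
    · exact ⟨_, h, by simp⟩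
    · exact ⟨_, h, by simp⟩
    · exact ⟨_, h, by simp⟩
    · exact ⟨_, h, by simp⟩
  · rintro ⟨⟨p1, p2⟩, hp, hadj⟩
    simp only at hadj
    have : (p1 = ci + 1 ∧ p2 = cj) ∨ (p1 = ci - 1 ∧ p2 = cj) ∨
        (p1 = ci ∧ p2 = cj + 1) ∨ (p1 = ci ∧ p2 = cj - 1) := by omega
    rcases this with ⟨rfl, rfl⟩ | ⟨rfl, rfl⟩ | ⟨rfl, rfl⟩ | ⟨rfl, rfl⟩
    · exact Or.inl hp
    · exact Or.inr (Or.inl hp)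
    · exact Or.inr (Or.inr (Or.inl hp))
    · exact Or.inr (Or.inr (Or.inr hp))

lemma pvNext_mem (forest : List (List Int)) (m n : Int) (vis : PySem.Set (Int × Int))
    (frontier : List (Int × Int)) (c : Int × Int) :
    c ∈ pvNext forest m n vis frontier ↔
      pvGood forest m n vis c ∧
        ∃ p ∈ frontier, (c.1 - p.1).natAbs + (c.2 - p.2).natAbs = 1 := by
  obtain ⟨ci, cj⟩ := c
  simp only [pvNext, pvCells, pvGood, List.mem_filter, List.mem_flatMap, List.mem_map,
    PySem.List.mem_pyRange_one, Bool.and_eq_true, decide_eq_true_eq,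
    Prod.ext_iff]
  rw [pvNbr_iff]
  constructor
  · rintro ⟨⟨i, hi, j, hj, rfl, rfl⟩, ⟨hv, hval⟩, hnbr⟩
    exact ⟨⟨hi.1, hi.2, hj.1, hj.2, hv, hval⟩, hnbr⟩
  · rintro ⟨⟨h1, h2, h3, h4, hv, hval⟩, hnbr⟩
    exact ⟨⟨ci, ⟨h1, h2⟩, cj, ⟨h3, h4⟩, rfl, rfl⟩, ⟨hv, hval⟩, hnbr⟩

lemma pvBfs_eq_aux (forest : List (List Int)) (m n : Int) (endc : Int × Int) :
    ∀ (fuel : Nat) (qa fb : List (Int × Int)) (va vb : PySem.Set (Int × Int)) (steps : Int),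
      (∀ c, c ∈ qa ↔ c ∈ fb) → (∀ c, c ∈ va ↔ c ∈ vb) → endc ∉ va →
      pvBfsA forest m n endc fuel qa va steps = pvBfsB forest m n endc fuel fb vb steps := by
  intro fuel
  induction fuel with
  | zero => intro qa fb va vb steps _ _ _; rfl
  | succ fuel ih =>
    intro qa fb va vb steps hq hv hend
    simp only [pvBfsA, pvBfsB]
    have hempty : qa.isEmpty = fb.isEmpty := by
      rcases qa with _ | ⟨a, qa⟩
      · rcases hfb : fb with _ | ⟨b, fb'⟩
        · rfl
        · exact absurd ((hq b).2 (hfb ▸ List.mem_cons_self)) (by simp)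
      · rcases hfb : fb with _ | ⟨b, fb'⟩
        · exact absurd ((hq a).1 List.mem_cons_self) (by simp [hfb])
        · rfl
    rw [hempty]
    by_cases hfb : fb.isEmpty
    · simp [hfb]
    · have hfb' : fb.isEmpty = false := by rwa [Bool.not_eq_true] at hfb
      rw [hfb']
      simp only [Bool.false_eq_true, if_false]
      obtain ⟨lvlN, lvlS⟩ := pvLevelA_spec forest m n endc qa [] va va
        (fun c => by simp) ⟨hend, by simp⟩
      have hfound : (pvLevelA forest m n endc qa [] va = none) ↔
          endc ∈ pvNext forest m n vb fb := by
        rw [lvlN, pvNext_mem]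
        constructor
        · rintro ⟨⟨g1, g2, g3, g4, g5, g6⟩, p, hp, hadj⟩
          exact ⟨⟨g1, g2, g3, g4, fun h => g5 ((hv _).2 h), g6⟩, p, (hq p).1 hp, hadj⟩
        · rintro ⟨⟨g1, g2, g3, g4, g5, g6⟩, p, hp, hadj⟩
          exact ⟨⟨g1, g2, g3, g4, fun h => g5 ((hv _).1 h), g6⟩, p, (hq p).2 hp, hadj⟩
      rcases hlvl : pvLevelA forest m n endc qa [] va with _ | ⟨q', va'⟩
      · rw [if_pos (hfound.1 hlvl)]
      · rw [if_neg (fun h => by rw [hfound.2 h] at hlvl; cases hlvl)]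
        show pvBfsA forest m n endc fuel q' va' (steps + 1) = _
        obtain ⟨g1, g2, g3⟩ := lvlS q' va' hlvl
        have hmemnext : ∀ c, c ∈ q' ↔ c ∈ pvNext forest m n vb fb := by
          intro c
          rw [g2 c, pvNext_mem]
          simp only [List.not_mem_nil, false_or]
          constructor
          · rintro ⟨⟨k1, k2, k3, k4, k5, k6⟩, p, hp, hadj⟩
            exact ⟨⟨k1, k2, k3, k4, fun h => k5 ((hv _).2 h), k6⟩, p, (hq p).1 hp, hadj⟩
          · rintro ⟨⟨k1, k2, k3, k4, k5, k6⟩, p, hp, hadj⟩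
            exact ⟨⟨k1, k2, k3, k4, fun h => k5 ((hv _).1 h), k6⟩, p, (hq p).2 hp, hadj⟩
        refine ih q' (pvNext forest m n vb fb) va'
          (PySem.Set.union vb (pvNext forest m n vb fb)) (steps + 1) hmemnext ?_ ?_
        · intro c
          rw [g3 c, PySem.Set.mem_union, hv c, hmemnext c]
        · intro h
          exact g1 (((g3 endc).1 h).resolve_left hend)

lemma pvDist_eq (forest : List (List Int)) (m n : Int) (src dst : Int × Int) :
    pvBfs forest m n src dst = pvDist forest m n src dst := by
  unfold pvBfs pvDist
  by_cases h : src = dst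
  · rw [if_pos h, if_pos h]
  · rw [if_neg h, if_neg h]
    refine pvBfs_eq_aux forest m n dst _ _ _ _ _ _ (fun c => Iff.rfl) (fun c => Iff.rfl) ?_
    rw [PySem.Set.mem_ofList]
    simp only [List.mem_singleton]
    exact fun hh => h hh.symm

lemma pvTrees_eq (forest : List (List Int)) (m n : Int) :
    PySem.List.sorted (pvTreesA forest m n) (fun t => t.1) false = pvTreesB forest m n := by
  unfold pvTreesA pvTreesB
  congr 1
  have hinner : ∀ (i : Int) (acc : List (Int × Int × Int)),
      (PySem.List.pyRange 0 n 1).foldl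
        (fun acc j => if pvVal forest i j > 1 then acc ++ [(pvVal forest i j, i, j)] else acc)
        acc =
      acc ++ ((PySem.List.pyRange 0 n 1).filter (fun j => decide (pvVal forest i j > 1))).map
        (fun j => (pvVal forest i j, i, j)) := by
    intro i acc
    exact PySem.List.foldl_append_ite _ _ _ _
  calc (PySem.List.pyRange 0 m 1).foldl
        (fun acc i => (PySem.List.pyRange 0 n 1).foldl
          (fun acc j => if pvVal forest i j > 1 then acc ++ [(pvVal forest i j, i, j)] else acc)
          acc) []
      = (PySem.List.pyRange 0 m 1).foldl (fun acc i =>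
          acc ++ ((PySem.List.pyRange 0 n 1).filter
            (fun j => decide (pvVal forest i j > 1))).map (fun j => (pvVal forest i j, i, j))) [] := by
        apply PySem.List.foldl_congr_mem
        intro acc i _
        exact hinner i acc
  _ = _ := List.flatMap_eq_foldl.symm

lemma pvRun_eq (forest : List (List Int)) (m n : Int) (trees : List (Int × Int × Int)) :
    ∀ (start : Int × Int) (total : Int),
      pvRunA forest m n trees start total = pvRunB forest m n trees start total := by
  induction trees with
  | nil => intro start total; rfl
  | cons hd rest ih =>
    obtain ⟨h, x, y⟩ := hd
    intro start total
    simp only [pvRunA, pvRunB, pvDist_eq]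
    by_cases hs : pvDist forest m n start (x, y) = -1
    · rw [if_pos hs, if_pos hs]
    · rw [if_neg hs, if_neg hs, ih]

-- ===== VERDICT (by name: the statement is the Claim_ definition above) =====
theorem cutOffTree_spec : Claim_equal_cutOffTree := by
  intro forest _ _
  unfold Spec_cutOffTree cutOffTree cutOffTree_alt
  simp only [pvTrees_eq, pvRun_eq]
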